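-- pv_equiv track=rewrite | github.com/posl/comment_recommendation | script/mod_gen/5_time/zh/099_B/4.py | solution
-- ===== SOURCE A (Python) =====
-- def solution(a,b):
--     #a = 8
--     #b = 13
--     #a = 54
--     #b = 65
--     sum = 0
--     for i in range(1,1000):
--         sum = sum + i
--         if sum == b - a:
--             return i - 1
--         if sum > b - a:
--             return i - 2
-- ===== SOURCE B (Python) =====
-- def solution(a, b):
--     # Binary search for the least i in [1, 999] with T(i) = i*(i+1)//2 >= b - a,
--     # instead of A's linear scan of the triangular numbers.
--     t = b - a
--     if t > 999 * 1000 // 2: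
--         return None
--     lo, hi = 1, 999
--     while lo < hi:
--         mid = (lo + hi) // 2
--         if mid * (mid + 1) // 2 >= t:
--             hi = mid
--         else:
--             lo = mid + 1
--     return lo - 1 if lo * (lo + 1) // 2 == t else lo - 2
-- ===== Notes on version B (the rewrite author's own statement) =====
-- stated objective: faster
-- what changed: Replaces A's linear scan over triangular sums 1..999 with a binary search for the least i with i*(i+1)//2 >= b-a, then derives the return value from that index.
import Mathlib
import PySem

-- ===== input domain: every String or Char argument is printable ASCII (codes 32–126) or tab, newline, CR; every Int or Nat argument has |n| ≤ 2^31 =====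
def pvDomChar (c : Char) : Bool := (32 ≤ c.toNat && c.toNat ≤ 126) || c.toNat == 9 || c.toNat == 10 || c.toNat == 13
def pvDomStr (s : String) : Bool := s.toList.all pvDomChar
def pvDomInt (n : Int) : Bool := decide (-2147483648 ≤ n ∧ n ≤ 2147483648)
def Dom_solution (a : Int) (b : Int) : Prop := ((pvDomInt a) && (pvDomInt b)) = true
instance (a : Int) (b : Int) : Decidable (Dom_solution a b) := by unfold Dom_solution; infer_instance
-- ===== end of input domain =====

-- B replaces A's linear scan of triangular sums with a binary search for the
-- least index i with i*(i+1)//2 >= b-a (objective: faster, O(log n) vs O(n)).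

-- ===== PORT A =====
-- the for-loop with its running sum and the two early returns, over range(1, 1000)
def solutionGo (t : Int) : List Int → Int → Option Int
  | [], _ => none
  | i :: rest, s =>
    let s' := s + i
    if s' = t then some (i - 1)
    else if s' > t then some (i - 2)
    else solutionGo t rest s'

def solution (a : Int) (b : Int) : Option Int :=
  solutionGo (b - a) (PySem.List.pyRange 1 1000 1) 0

-- ===== PORT B =====
-- the while-loop of Source B: binary search on [lo, hi]
def bsLoop (t : Int) (lo hi : Nat) : Nat :=
  if lo < hi then
    let mid := (lo + hi) / 2
    if t ≤ ((mid * (mid + 1) / 2 : Nat) : Int) then bsLoop t lo mid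
    else bsLoop t (mid + 1) hi
  else lo
termination_by hi - lo
decreasing_by all_goals omega

def solution_alt (a : Int) (b : Int) : Option Int :=
  let t := b - a
  if t > 999 * 1000 / 2 then none
  else
    let i := bsLoop t 1 999
    if ((i * (i + 1) / 2 : Nat) : Int) = t then some ((i : Int) - 1)
    else some ((i : Int) - 2)

-- ===== PRECONDITION & SPEC =====
def Spec_solution (a : Int) (b : Int) (out : Option Int) : Prop := out = solution_alt a b
instance (a : Int) (b : Int) (out : Option Int) : Decidable (Spec_solution a b out) := by unfold Spec_solution; infer_instance

-- ===== CLAIM (what is proved, stated in full; the proofs are below) =====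
def Claim_equal_solution : Prop := ∀ (a : Int) (b : Int), Dom_solution a b → Spec_solution a b (solution a b)

-- ===== LEMMAS AND PROOFS =====

def tri (i : Nat) : Int := ((i * (i + 1) / 2 : Nat) : Int)

theorem tri_succ (i : Nat) : tri (i + 1) = tri i + (i + 1 : Nat) := by
  unfold tri
  have h : (i + 1) * (i + 1 + 1) = i * (i + 1) + 2 * (i + 1) := by ring
  have h2 : (i + 1) * (i + 1 + 1) / 2 = i * (i + 1) / 2 + (i + 1) := by omega
  rw [h2]; push_cast; ring

theorem tri_mono : StrictMono tri := by
  have h : ∀ i, tri i < tri (i + 1) := by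
    intro i; rw [tri_succ]; push_cast; omega
  exact strictMono_nat_of_lt_succ h

theorem tri_999 : tri 999 = 499500 := by decide

-- bsLoop returns the least index ≥ lo whose triangular number reaches t,
-- provided t ≤ tri hi.
theorem bsLoop_spec (t : Int) (lo hi : Nat) (hle : lo ≤ hi) (hhi : t ≤ tri hi) :
    lo ≤ bsLoop t lo hi ∧ bsLoop t lo hi ≤ hi ∧ t ≤ tri (bsLoop t lo hi) ∧
      ∀ j, lo ≤ j → j < bsLoop t lo hi → tri j < t := by
  fun_induction bsLoop t lo hi with
  | case1 lo hi h mid hmid ih =>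
    have := ih (by omega) hmid
    refine ⟨by omega, by omega, this.2.2.1, ?_⟩
    intro j hj1 hj2; exact this.2.2.2 j hj1 hj2
  | case2 lo hi h mid hmid ih =>
    have := ih (by omega) hhi
    refine ⟨by omega, this.2.1, this.2.2.1, ?_⟩
    intro j hj1 hj2
    by_cases hj : mid + 1 ≤ j
    · exact this.2.2.2 j hj hj2
    · calc tri j ≤ tri mid := tri_mono.monotone (by omega)
        _ < t := by simpa [tri] using hmid
  | case3 lo hi h =>
    have hlohi : lo = hi := by omega
    subst hlohi
    exact ⟨le_rfl, le_rfl, hhi, by omega⟩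

-- characterization of A's loop: starting at index l with running sum tri (l-1) < t,
-- the loop returns exactly what B computes.
theorem loopA (t : Int) : ∀ k l : Nat, l = 1000 - k → 1 ≤ l → tri (l - 1) < t →
    solutionGo t (PySem.List.pyRange (l : Int) 1000 1) (tri (l - 1)) =
      (if t > 499500 then none
       else
         let i := bsLoop t 1 999
         if tri i = t then some ((i : Int) - 1) else some ((i : Int) - 2)) := by
  intro k
  induction k with
  | zero =>
    intro l hl h1 hlt
    subst hl
    rw [PySem.List.pyRange_one_eq_nil (by norm_num)]
    have : (499500 : Int) < t := by simpa [tri_999] using hlt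
    simp [solutionGo, if_pos this]
  | succ k ih =>
    intro l hl h1 hlt
    by_cases hub : l ≤ 999
    · have hcons : PySem.List.pyRange (l : Int) 1000 1 =
          (l : Int) :: PySem.List.pyRange ((l : Int) + 1) 1000 1 :=
        PySem.List.pyRange_one_cons (by exact_mod_cast (show l < 1000 by omega))
      have hsum : tri (l - 1) + (l : Int) = tri l := by
        have h := tri_succ (l - 1)
        have hl1 : l - 1 + 1 = l := by omega
        rw [hl1] at h
        omega
      rw [hcons]
      show (if tri (l-1) + (l:Int) = t then some ((l:Int) - 1)
            else if tri (l-1) + (l:Int) > t then some ((l:Int) - 2)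
            else solutionGo t (PySem.List.pyRange ((l:Int)+1) 1000 1) (tri (l-1) + (l:Int))) = _
      rw [hsum]
      have hfind : t ≤ tri l → bsLoop t 1 999 = l := by
        intro hge
        obtain ⟨h1', h2', h3', h4'⟩ := bsLoop_spec t 1 999 (by omega)
          (le_trans hge (tri_mono.monotone hub))
        by_contra hne
        rcases lt_or_gt_of_ne (fun e => hne e.symm) with hlt' | hgt'
        · exact absurd (h4' l h1 hlt') (not_lt.mpr hge)
        · have : tri (bsLoop t 1 999) ≤ tri (l - 1) := tri_mono.monotone (by omega)
          omega
      by_cases heq : tri l = t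
      · rw [if_pos heq]
        have hb := hfind (le_of_eq heq.symm)
        have hn : ¬ t > 499500 := by
          have := tri_mono.monotone hub
          rw [tri_999] at this; omega
        rw [if_neg hn]; simp only [hb, if_pos heq]
      · rw [if_neg heq]
        by_cases hgt : tri l > t
        · rw [if_pos hgt]
          have hb := hfind (le_of_lt hgt)
          have hn : ¬ t > 499500 := by
            have := tri_mono.monotone hub
            rw [tri_999] at this; omega
          rw [if_neg hn]; simp only [hb, if_neg heq]
        · rw [if_neg hgt]
          have hlt2 : tri l < t := by omega
          have := ih (l + 1) (by omega) (by omega)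
            (by simpa using hlt2)
          simpa using this
    · omega

theorem solution_eq (a b : Int) : solution a b = solution_alt a b := by
  unfold solution solution_alt
  set t := b - a with ht
  by_cases hpos : 0 < t
  · have h0 : tri 0 < t := by simpa [tri] using hpos
    have := loopA t 999 1 (by norm_num) le_rfl (by simpa using h0)
    simpa [tri] using this
  · -- t ≤ 0: A returns some (-1) on the first iteration; B finds i = 1
    have hcons : PySem.List.pyRange 1 1000 1 = 1 :: PySem.List.pyRange 2 1000 1 :=
      PySem.List.pyRange_one_cons (by norm_num)
    rw [hcons]
    have h1 : ¬ ((0 : Int) + 1 = t) := by omega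
    have h2 : (0 : Int) + 1 > t := by omega
    show (if (0:Int) + 1 = t then some (1 - 1 : Int)
          else if (0:Int) + 1 > t then some (1 - 2 : Int)
          else solutionGo t (PySem.List.pyRange 2 1000 1) ((0:Int)+1)) = _
    rw [if_neg h1, if_pos h2]
    have hn : ¬ t > 999 * 1000 / 2 := by omega
    rw [if_neg hn]
    have hb : bsLoop t 1 999 = 1 := by
      obtain ⟨h1', h2', h3', h4'⟩ := bsLoop_spec t 1 999 (by omega)
        (by rw [tri_999]; omega)
      by_contra hne
      have : tri 1 < t := h4' 1 le_rfl (by omega)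
      have : (1 : Int) < t := by simpa [tri] using this
      omega
    rw [hb]
    have : ¬ (((1 * (1 + 1) / 2 : Nat) : Int) = t) := by norm_num; omega
    simp only [this, if_false]
    norm_num

-- ===== VERDICT (by name: the statement is the Claim_ definition above) =====
theorem solution_spec : Claim_equal_solution := by
  intro a b _
  unfold Spec_solution
  exact solution_eq a b
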